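-- pv_equiv track=rewrite | github.com/renjinirajeev/demo_python_projects2 | functionprograms/demo.py | find_lowest_positive_integer
-- ===== SOURCE A (Python) =====
-- def find_lowest_positive_integer(lst):
--     lowest_positive = None
--     index = -1
--
--     for i, num in enumerate(lst):
--         if num > 0 and (lowest_positive is None or num < lowest_positive):
--             lowest_positive = num
--             index = i
--
--     return lowest_positive, index
-- ===== SOURCE B (Python) =====
-- def find_lowest_positive_integer(lst):
--     positives = [num for num in lst if num > 0]
--     if not positives:
--         return None, -1
--     m = min(positives)
--     return m, lst.index(m)
-- ===== Notes on version B (the rewrite author's own statement) =====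
-- stated objective: simpler
-- what changed: Replaces the fused enumerate loop that tracks (lowest, index) with a filter of the positives, a min reduction, and a separate lst.index lookup.
import Mathlib
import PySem

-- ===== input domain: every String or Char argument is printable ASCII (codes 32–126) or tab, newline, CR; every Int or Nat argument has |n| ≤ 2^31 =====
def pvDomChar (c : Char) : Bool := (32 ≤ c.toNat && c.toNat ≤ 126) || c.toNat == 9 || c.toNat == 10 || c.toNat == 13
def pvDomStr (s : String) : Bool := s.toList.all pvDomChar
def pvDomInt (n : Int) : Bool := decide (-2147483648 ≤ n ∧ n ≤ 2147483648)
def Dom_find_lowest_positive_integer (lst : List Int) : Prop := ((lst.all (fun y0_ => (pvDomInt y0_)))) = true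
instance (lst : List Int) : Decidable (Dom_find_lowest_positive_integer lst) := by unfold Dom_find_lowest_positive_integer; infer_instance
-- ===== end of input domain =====

-- B replaces A's fused enumerate loop tracking (lowest, index) with filter + min + a separate index lookup (objective: simpler).


-- ===== PORT A =====
def find_lowest_positive_integer (lst : List Int) : Option Int × Int :=
  (PySem.List.enumerate lst).foldl
    (fun (st : Option Int × Int) (p : Int × Int) =>
      if decide (p.2 > 0) && (match st.1 with | none => true | some m => decide (p.2 < m)) then (some p.2, p.1) else st)
    (none, -1)

-- ===== PORT B =====
def find_lowest_positive_integer_alt (lst : List Int) : Option Int × Int :=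
  match PySem.List.min? (lst.filter (fun num => decide (num > 0))) (fun x => x) with
  | none => (none, -1)
  -- lst.index(m) cannot raise here (m is an element of lst); the getD 0 branch is unreachable
  | some m => (some m, ((PySem.List.index? lst m).map (Int.ofNat ·)).getD 0)

-- ===== PRECONDITION & SPEC =====
def Spec_find_lowest_positive_integer (lst : List Int) (out : Option Int × Int) : Prop := out = find_lowest_positive_integer_alt lst
instance (lst : List Int) (out : Option Int × Int) : Decidable (Spec_find_lowest_positive_integer lst out) := by unfold Spec_find_lowest_positive_integer; infer_instance

-- ===== CLAIM (what is proved, stated in full; the proofs are below) =====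
def Claim_equal_find_lowest_positive_integer : Prop := ∀ (lst : List Int), Dom_find_lowest_positive_integer lst → Spec_find_lowest_positive_integer lst (find_lowest_positive_integer lst)

-- ===== LEMMAS AND PROOFS =====

-- Python's min over a nonempty list appended with one element
lemma min?_id_append_singleton (l : List Int) (x : Int) :
    PySem.List.min? (l ++ [x]) (fun y => y)
      = some (match PySem.List.min? l (fun y => y) with | none => x | some m => min m x) := by
  cases l with
  | nil => simp [PySem.List.min?]
  | cons y t =>
      rw [List.cons_append, PySem.List.min?_id_cons, PySem.List.min?_id_cons, List.foldl_append]
      simp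

lemma mem_of_min?_pos {lst : List Int} {m : Int}
    (h : PySem.List.min? (lst.filter (fun num => decide (num > 0))) (fun x => x) = some m) :
    m ∈ lst ∧ 0 < m := by
  have hm := PySem.List.min?_mem h
  rw [List.mem_filter] at hm
  exact ⟨hm.1, by simpa using hm.2⟩

theorem ab_eq (lst : List Int) : find_lowest_positive_integer lst = find_lowest_positive_integer_alt lst := by
  induction lst using List.reverseRecOn with
  | nil => rfl
  | append_singleton l x ih =>
      unfold find_lowest_positive_integer at *
      rw [PySem.List.enumerate_append, List.foldl_append, ih]
      unfold find_lowest_positive_integer_alt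
      rw [List.filter_append]
      by_cases hx : 0 < x
      · have hfe : List.filter (fun num => decide (num > 0)) [x] = [x] := by simp [hx]
        rw [hfe, min?_id_append_singleton]
        cases hmin : PySem.List.min? (l.filter (fun num => decide (num > 0))) (fun y => y) with
        | none =>
            -- no positive in l; x is the new (only) positive, and x ∉ l
            have hxl : x ∉ l := by
              intro hmem
              have : x ∈ l.filter (fun num => decide (num > 0)) := by
                rw [List.mem_filter]; exact ⟨hmem, by simpa using hx⟩
              rw [PySem.List.min?_eq_none_iff] at hmin
              simp [hmin] at this
            simp only [PySem.List.enumerate_cons, PySem.List.enumerate_nil,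
              List.foldl_cons, List.foldl_nil,
              PySem.List.index?_append_singleton_self l x hxl]
            simp [hx]
        | some m =>
            have hmmem := mem_of_min?_pos hmin
            by_cases hlt : x < m
            · have hxl : x ∉ l := by
                intro hmem
                have hxf : x ∈ l.filter (fun num => decide (num > 0)) := by
                  rw [List.mem_filter]; exact ⟨hmem, by simpa using hx⟩
                have := PySem.List.min?_isMin hmin x hxf
                omega
              simp only [min_eq_right (le_of_lt hlt), PySem.List.enumerate_cons,
                PySem.List.enumerate_nil, List.foldl_cons, List.foldl_nil,
                PySem.List.index?_append_singleton_self l x hxl]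
              simp [hx, hlt]
            · simp only [min_eq_left (show x ≥ m by omega), PySem.List.enumerate_cons,
                PySem.List.enumerate_nil, List.foldl_cons, List.foldl_nil,
                PySem.List.index?_append_of_mem [x] hmmem.1]
              simp [hx, hlt]
      · -- x not positive: A's step is a no-op, B's positives are unchanged
        have hfe : List.filter (fun num => decide (num > 0)) [x] = [] := by simp [hx]
        rw [hfe, List.append_nil]
        cases hmin : PySem.List.min? (l.filter (fun num => decide (num > 0))) (fun y => y) with
        | none => simp [PySem.List.enumerate_cons, hx]
        | some m =>
            have hmmem := mem_of_min?_pos hmin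
            simp only [PySem.List.enumerate_cons, PySem.List.enumerate_nil,
              List.foldl_cons, List.foldl_nil, PySem.List.index?_append_of_mem [x] hmmem.1]
            simp [hx]

-- ===== VERDICT (by name: the statement is the Claim_ definition above) =====
theorem find_lowest_positive_integer_spec : Claim_equal_find_lowest_positive_integer := by
  intro lst _
  exact ab_eq lst
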